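-- pv_equiv track=rewrite | github.com/iamanandkris/wrkflw | scripts/bridge_workflow_to_openspec.py | parse_markdown_sections
-- ===== SOURCE A (Python) =====
-- def parse_markdown_sections(text: str) -> dict[str, list[str]]:
--     sections: dict[str, list[str]] = {}
--     current: str | None = None
--     for raw_line in text.splitlines():
--         line = raw_line.rstrip()
--         if line.startswith("## "):
--             current = line[3:].strip()
--             sections.setdefault(current, [])
--             continue
--         if current is not None:
--             sections[current].append(line)
--     return sections
-- ===== SOURCE B (Python) =====
-- def parse_markdown_sections(text: str) -> dict[str, list[str]]:
--     lines = [line.rstrip() for line in text.splitlines()]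
--     # drop the prologue before the first heading
--     while lines and not lines[0].startswith("## "):
--         lines = lines[1:]
--     # phase 1: cut the document into (title, body-slice) segments
--     segments = []
--     while lines:
--         title = lines[0][3:].strip()
--         rest = lines[1:]
--         cut = 0
--         while cut < len(rest) and not rest[cut].startswith("## "):
--             cut += 1
--         segments.append((title, rest[:cut]))
--         lines = rest[cut:]
--     # phase 2: merge segments into a dict (repeated titles extend in first-seen order)
--     sections: dict[str, list[str]] = {}
--     for title, body in segments:
--         sections.setdefault(title, []).extend(body)
--     return sections
-- ===== Notes on version B (the rewrite author's own statement) =====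
-- stated objective: alternative
-- what changed: A is a one-pass state machine that tracks the most recent heading and appends line by line; B first cuts the rstripped lines into (title, body) segments (drop the prologue, then take/drop up to each next heading) and then merges the segments into the dict in a second phase.
import Mathlib
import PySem

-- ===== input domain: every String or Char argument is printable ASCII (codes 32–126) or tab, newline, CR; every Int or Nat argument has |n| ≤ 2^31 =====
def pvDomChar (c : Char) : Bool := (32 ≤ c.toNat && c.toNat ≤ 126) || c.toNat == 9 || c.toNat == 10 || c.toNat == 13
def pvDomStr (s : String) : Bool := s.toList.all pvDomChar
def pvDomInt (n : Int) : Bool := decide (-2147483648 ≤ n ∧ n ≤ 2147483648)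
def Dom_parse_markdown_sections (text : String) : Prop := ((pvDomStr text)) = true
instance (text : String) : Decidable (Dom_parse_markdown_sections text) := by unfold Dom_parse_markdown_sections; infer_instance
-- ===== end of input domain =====

-- B replaces A's one-pass state machine (mutable `current`) by a two-phase decomposition —
-- segment the lines into (title, body) blocks, then merge the blocks into the dict —
-- for clarity (objective: alternative, same cost).

-- ===== PORT A =====
-- shared tiny abbreviations for 'line.startswith("## ")' and 'line[3:].strip()'
def pvHead (l : String) : Bool := PySem.Str.startswith l "## "
def pvTitle (l : String) : String := PySem.Str.strip (PySem.Str.slice l (some 3) none)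

-- the loop body of A, acting on the already-rstripped line; 'sections[current].append(line)'
-- is ported as modify with default [] — current is always present there (setdefault ran
-- when current was set), so the default is never used
def pvStepA (st : PySem.Dict String (List String) × Option String) (line : String) :
    PySem.Dict String (List String) × Option String :=
  if pvHead line then
    let current := pvTitle line
    (st.1.setdefault current [], some current)
  else
    match st.2 with
    | some c => (st.1.modify c [] (fun b => b ++ [line]), some c)
    | none => st

def parse_markdown_sections (text : String) : List (String × List String) :=
  ((PySem.Str.splitlines text).foldl
      (fun st raw_line => pvStepA st (PySem.Str.rstrip raw_line))
      (PySem.Dict.empty, none)).1.items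

-- ===== PORT B =====
-- Source B's second while-loop: cut the (already prologue-free) lines into (title, body) segments;
-- the inner counting loop 'cut' and the slices rest[:cut] / rest[cut:] are takeWhile / dropWhile
def pvSegsLoop : List String → List (String × List String)
  | [] => []
  | l :: ls =>
    (pvTitle l, ls.takeWhile (fun x => !pvHead x)) :: pvSegsLoop (ls.dropWhile (fun x => !pvHead x))
termination_by ls => ls.length
decreasing_by
  have := List.length_dropWhile_le (fun x => !pvHead x) ls
  simp only [List.length_cons]
  omega

-- Source B's merge step: sections.setdefault(title, []).extend(body), i.e. d[t] = d.get(t, []) ++ body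
def pvMerge (d : PySem.Dict String (List String)) (seg : String × List String) :
    PySem.Dict String (List String) :=
  d.modify seg.1 [] (fun b => b ++ seg.2)

def parse_markdown_sections_alt (text : String) : List (String × List String) :=
  let lines := (PySem.Str.splitlines text).map PySem.Str.rstrip
  ((pvSegsLoop (lines.dropWhile (fun x => !pvHead x))).foldl pvMerge PySem.Dict.empty).items

-- ===== PRECONDITION & SPEC =====
def Spec_parse_markdown_sections (text : String) (out : List (String × List String)) : Prop := out = parse_markdown_sections_alt text
instance (text : String) (out : List (String × List String)) : Decidable (Spec_parse_markdown_sections text out) := by unfold Spec_parse_markdown_sections; infer_instance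

-- ===== CLAIM (what is proved, stated in full; the proofs are below) =====
def Claim_equal_parse_markdown_sections : Prop := ∀ (text : String), Dom_parse_markdown_sections text → Spec_parse_markdown_sections text (parse_markdown_sections text)

-- ===== LEMMAS AND PROOFS =====

-- re-inserting a key with its current value changes nothing
theorem pv_insert_getD_self {d : PySem.Dict String (List String)} {c : String}
    (hnd : d.keys.Nodup) (hc : d.contains c = true) (x : List String) :
    d.insert c (d.getD c x) = d := by
  apply PySem.Dict.ext
  rw [PySem.Dict.items_insert_of_contains d _ hc]
  have : ∀ p ∈ d.items, (if (p.1 == c) = true then (c, d.getD c x) else p) = p := by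
    intro p hp
    obtain ⟨k, v⟩ := p
    by_cases h : k = c
    · subst h
      have := PySem.Dict.getD_of_mem_items d hp hnd x
      simp [this]
    · simp [h]
  calc List.map (fun p => if (p.1 == c) = true then (c, d.getD c x) else p) d.items
      = List.map id d.items := List.map_congr_left this
    _ = d.items := List.map_id d.items

theorem pv_nodup_modify (d : PySem.Dict String (List String)) (c : String) (d0 : List String)
    (f : List String → List String) (hnd : d.keys.Nodup) : (d.modify c d0 f).keys.Nodup := by
  rw [PySem.Dict.keys_modify]
  exact PySem.Dict.nodup_keys_insert d c _ hnd

-- appending the lines of a block one by one equals appending the whole block at once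
theorem pv_foldl_app (bs : List String) : ∀ (d : PySem.Dict String (List String)) (c : String),
    d.keys.Nodup → d.contains c = true →
    bs.foldl (fun d l => d.modify c [] (fun b => b ++ [l])) d = d.modify c [] (fun b => b ++ bs) := by
  induction bs with
  | nil =>
    intro d c hnd hc
    simp only [List.foldl_nil, PySem.Dict.modify, List.append_nil]
    exact (pv_insert_getD_self hnd hc []).symm
  | cons b bs ih =>
    intro d c hnd hc
    simp only [List.foldl_cons]
    rw [ih (d.modify c [] (fun v => v ++ [b])) c
        (pv_nodup_modify d c [] _ hnd)
        (by rw [PySem.Dict.contains_modify]; simp)]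
    simp only [PySem.Dict.modify, PySem.Dict.getD_insert_self, PySem.Dict.insert_insert_self,
      List.append_assoc, List.singleton_append]

-- setdefault then append the block = one merge step
theorem pv_setdefault_app (bs : List String) (d : PySem.Dict String (List String)) (c : String)
    (hnd : d.keys.Nodup) :
    bs.foldl (fun d l => d.modify c [] (fun b => b ++ [l])) (d.setdefault c []) =
      d.modify c [] (fun b => b ++ bs) := by
  by_cases hc : d.contains c = true
  · rw [PySem.Dict.setdefault_of_contains d [] hc]
    exact pv_foldl_app bs d c hnd hc
  · have hc' : d.contains c = false := by simpa using hc
    rw [PySem.Dict.setdefault_of_not_contains d [] hc']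
    rw [pv_foldl_app bs (d.insert c []) c (PySem.Dict.nodup_keys_insert d c [] hnd)
        (PySem.Dict.contains_insert_self d c [])]
    simp only [PySem.Dict.modify, PySem.Dict.getD_insert_self, PySem.Dict.insert_insert_self,
      List.nil_append, PySem.Dict.getD_of_not_contains d [] hc']

-- A's fold over a heading-free block with current = some c is the per-line append fold
theorem pv_block (bs : List String) : ∀ (d : PySem.Dict String (List String)) (c : String),
    (∀ x ∈ bs, pvHead x = false) →
    bs.foldl pvStepA (d, some c) =
      (bs.foldl (fun d l => d.modify c [] (fun b => b ++ [l])) d, some c) := by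
  induction bs with
  | nil => intro d c _; rfl
  | cons b bs ih =>
    intro d c h
    have hb : pvHead b = false := h b (List.mem_cons_self)
    simp only [List.foldl_cons, pvStepA, hb, Bool.false_eq_true, if_false]
    exact ih _ c (fun x hx => h x (List.mem_cons_of_mem b hx))

-- the head of a dropWhile (!pvHead) remainder is a heading
theorem pv_dropWhile_head : ∀ (ls : List String) (r : String) (rs : List String),
    ls.dropWhile (fun x => !pvHead x) = r :: rs → pvHead r = true := by
  intro ls
  induction ls with
  | nil => intro r rs h; simp at h
  | cons l ls ih =>
    intro r rs h
    rw [List.dropWhile_cons] at h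
    by_cases hl : pvHead l
    · simp [hl] at h; rw [← h.1]; exact hl
    · simpa [hl] using ih r rs (by simpa [hl] using h)

-- when the remaining lines start with a heading (or are empty), the current section is irrelevant
theorem pv_restart (rest : List String) (d : PySem.Dict String (List String)) (c : String)
    (h : rest = [] ∨ ∃ r rs, rest = r :: rs ∧ pvHead r = true) :
    (rest.foldl pvStepA (d, some c)).1 = (rest.foldl pvStepA (d, none)).1 := by
  rcases h with h | ⟨r, rs, hrest, hr⟩
  · rw [h]; rfl
  · rw [hrest]
    simp only [List.foldl_cons, pvStepA, hr, if_true]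

-- main invariant: A's fold from (d, none) computes B's segment-merge fold on d
theorem pv_main : ∀ (N : Nat) (lines : List String), lines.length ≤ N →
    ∀ (d : PySem.Dict String (List String)), d.keys.Nodup →
    (lines.foldl pvStepA (d, none)).1 =
      (pvSegsLoop (lines.dropWhile (fun x => !pvHead x))).foldl pvMerge d := by
  intro N
  induction N with
  | zero =>
    intro lines hlen d _
    have : lines = [] := List.eq_nil_of_length_eq_zero (Nat.le_zero.mp hlen)
    subst this; simp [pvSegsLoop]
  | succ N ih =>
    intro lines hlen d hnd
    match lines with
    | [] => simp [pvSegsLoop]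
    | l :: ls =>
      have hls : ls.length ≤ N := by simpa using Nat.le_of_succ_le_succ (by simpa using hlen)
      by_cases hl : pvHead l
      case neg =>
        have hstep : pvStepA (d, none) l = (d, none) := by
          simp only [pvStepA, hl, Bool.false_eq_true, if_false]
        rw [List.foldl_cons, hstep, List.dropWhile_cons]
        simp only [hl, Bool.not_false, if_true]
        exact ih ls hls d hnd
      case pos =>
        have hstep : pvStepA (d, none) l = (d.setdefault (pvTitle l) [], some (pvTitle l)) := by
          simp only [pvStepA, hl, if_true]
        rw [List.foldl_cons, hstep]
        set t := pvTitle l with ht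
        set bs := ls.takeWhile (fun x => !pvHead x) with hbs
        set rest := ls.dropWhile (fun x => !pvHead x) with hrest
        have hsplit : ls = bs ++ rest := (List.takeWhile_append_dropWhile).symm
        -- left side
        conv_lhs => rw [hsplit, List.foldl_append]
        have hbsmem : ∀ x ∈ bs, pvHead x = false := by
          intro x hx
          have := List.mem_takeWhile_imp hx
          simpa using this
        rw [pv_block bs _ t hbsmem, pv_setdefault_app bs d t hnd]
        set dm := d.modify t [] (fun b => b ++ bs) with hdm
        have hdmnd : dm.keys.Nodup := pv_nodup_modify d t [] _ hnd
        have hshape : rest = [] ∨ ∃ r rs, rest = r :: rs ∧ pvHead r = true := by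
          cases hq : rest with
          | nil => exact Or.inl rfl
          | cons r rs => exact Or.inr ⟨r, rs, rfl, pv_dropWhile_head ls r rs (hrest.symm.trans hq)⟩
        rw [pv_restart rest dm t hshape]
        have hrestlen : rest.length ≤ N := by
          have h2 := List.length_dropWhile_le (fun x => !pvHead x) ls
          rw [← hrest] at h2
          omega
        rw [ih rest hrestlen dm hdmnd]
        have hidem : rest.dropWhile (fun x => !pvHead x) = rest := by
          rcases hshape with h | ⟨r, rs, hr, hhr⟩
          · rw [h]; rfl
          · rw [hr, List.dropWhile_cons]; simp [hhr]
        rw [hidem]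
        -- right side
        rw [List.dropWhile_cons]
        simp only [hl, Bool.not_true, Bool.false_eq_true, if_false]
        rw [pvSegsLoop]
        rfl

-- ===== VERDICT (by name: the statement is the Claim_ definition above) =====
theorem parse_markdown_sections_spec : Claim_equal_parse_markdown_sections := by
  intro text _
  unfold Spec_parse_markdown_sections parse_markdown_sections parse_markdown_sections_alt
  rw [← List.foldl_map (f := PySem.Str.rstrip) (g := pvStepA)]
  rw [pv_main ((PySem.Str.splitlines text).map PySem.Str.rstrip).length _ le_rfl
      PySem.Dict.empty PySem.Dict.nodup_keys_empty]
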